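-- pv_equiv track=rewrite | github.com/hombreplata-cpu/boxcutter | tests/test_invariants_static.py | _function_body
-- ===== SOURCE A (Python) =====
-- def _function_body(src: str, def_signature: str) -> str:
--     """Return the source of the function whose def line contains
--     def_signature, up to the next top-level def/class or end of file."""
--     lines = src.splitlines()
--     start = None
--     for i, line in enumerate(lines):
--         if def_signature in line:
--             start = i
--             break
--     assert start is not None, f"Could not find {def_signature} in source"
--     body = [lines[start]]
--     for line in lines[start + 1 :]:
--         if line.startswith("def ") or line.startswith("class "):
--             break
--         body.append(line)
--     return "\n".join(body)
-- ===== SOURCE B (Python) =====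
-- def _function_body(src: str, def_signature: str) -> str:
--     """Different decomposition: first GROUP the source into top-level blocks
--     (each line starting with 'def ' or 'class ' opens a new block), then
--     return the tail of the first block starting at its first line that
--     contains def_signature.  Correct because the lines from the match up to
--     the next top-level def/class are exactly the rest of the match's block."""
--     blocks = []
--     current = []
--     for line in src.splitlines():
--         if line.startswith("def ") or line.startswith("class "):
--             blocks.append(current)
--             current = [line]
--         else:
--             current.append(line)
--     blocks.append(current)
--     for block in blocks:
--         for j, line in enumerate(block):
--             if def_signature in line:
--                 return "\n".join(block[j:])
--     raise AssertionError(f"Could not find {def_signature} in source")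
-- ===== Notes on version B (the rewrite author's own statement) =====
-- stated objective: alternative
-- what changed: Instead of A's find-index-then-slice-and-scan, B first partitions the source into top-level blocks delimited by 'def '/'class ' lines and then returns the tail of the first block from its first line containing the signature.
import Mathlib
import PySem

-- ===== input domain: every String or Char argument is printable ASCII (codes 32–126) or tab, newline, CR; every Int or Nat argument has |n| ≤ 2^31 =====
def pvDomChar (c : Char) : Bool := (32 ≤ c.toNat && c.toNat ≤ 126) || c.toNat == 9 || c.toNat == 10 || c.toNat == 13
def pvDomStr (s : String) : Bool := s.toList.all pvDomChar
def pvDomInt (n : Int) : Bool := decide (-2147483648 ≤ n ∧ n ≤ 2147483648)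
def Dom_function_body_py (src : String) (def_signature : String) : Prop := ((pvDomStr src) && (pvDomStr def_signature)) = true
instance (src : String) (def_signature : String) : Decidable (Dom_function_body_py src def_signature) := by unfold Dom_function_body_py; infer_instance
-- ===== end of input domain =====

-- B replaces A's find-index-then-slice-and-scan by a block decomposition: it first groups the
-- lines into top-level blocks delimited by 'def '/'class ' lines, then returns the tail of the
-- first block from its first line containing the signature; same cost, alternative algorithm.

-- ===== PORT A =====
-- first loop: 'for i, line in enumerate(lines): if def_signature in line: start = i; break'
def pvFindStart (sig : String) : List String → Nat → Option Nat
  | [], _ => none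
  | l :: ls, i => if PySem.Str.isIn sig l then some i else pvFindStart sig ls (i + 1)

-- second loop: 'for line in lines[start+1:]: if startswith def/class: break; body.append(line)'
def pvTakeBody : List String → List String
  | [] => []
  | l :: ls =>
    if PySem.Str.startswith l "def " || PySem.Str.startswith l "class " then []
    else l :: pvTakeBody ls

def function_body_py (src : String) (def_signature : String) : String :=
  let lines := PySem.Str.splitlines src
  match pvFindStart def_signature lines 0 with
  | none => ""  -- Python raises AssertionError here; excluded by Pre_
  | some start =>
    PySem.Str.join "\n" (lines.getD start "" :: pvTakeBody (lines.drop (start + 1)))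

-- ===== PORT B =====
-- the grouping loop: each 'def '/'class ' line closes `current` into blocks and opens a new one
def pvGroup (blocks : List (List String)) (current : List String) : List String → List (List String)
  | [] => blocks ++ [current]
  | l :: ls =>
    if PySem.Str.startswith l "def " || PySem.Str.startswith l "class " then
      pvGroup (blocks ++ [current]) [l] ls
    else
      pvGroup blocks (current ++ [l]) ls

-- the inner search loop: first line of the block containing the signature, and block[j:]
def pvSearchBlock (sig : String) : List String → Option (List String)
  | [] => none
  | l :: ls => if PySem.Str.isIn sig l then some (l :: ls) else pvSearchBlock sig ls

-- the outer loop over the blocks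
def pvSearchBlocks (sig : String) : List (List String) → Option (List String)
  | [] => none
  | b :: bs =>
    match pvSearchBlock sig b with
    | some r => some r
    | none => pvSearchBlocks sig bs

def function_body_py_alt (src : String) (def_signature : String) : String :=
  match pvSearchBlocks def_signature (pvGroup [] [] (PySem.Str.splitlines src)) with
  | none => ""  -- B raises AssertionError here; excluded by Pre_
  | some body => PySem.Str.join "\n" body

-- ===== PRECONDITION & SPEC =====
-- A raises AssertionError when no line of src contains def_signature; Pre_ excludes exactly those inputs.
def Pre_function_body_py (src : String) (def_signature : String) : Prop :=
  (PySem.Str.splitlines src).any (fun l => PySem.Str.isIn def_signature l) = true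
instance (src : String) (def_signature : String) : Decidable (Pre_function_body_py src def_signature) := by
  unfold Pre_function_body_py; infer_instance
def pvWitness_function_body_py : String × String := ("def f():\n  return 1\n\ndef g():\n  pass", "def f")

def Spec_function_body_py (src : String) (def_signature : String) (out : String) : Prop := out = function_body_py_alt src def_signature
instance (src : String) (def_signature : String) (out : String) : Decidable (Spec_function_body_py src def_signature out) := by unfold Spec_function_body_py; infer_instance

-- ===== CLAIM (what is proved, stated in full; the proofs are below) =====
def Claim_equal_function_body_py : Prop := ∀ (src : String) (def_signature : String), Dom_function_body_py src def_signature → Pre_function_body_py src def_signature → Spec_function_body_py src def_signature (function_body_py src def_signature)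

-- ===== LEMMAS AND PROOFS =====

-- proof-only intermediate form: one fused scan (match-then-collect) over the lines
def pvCollect : List String → List String
  | [] => []
  | l :: ls =>
    if PySem.Str.startswith l "def " || PySem.Str.startswith l "class " then []
    else l :: pvCollect ls

def pvScan (sig : String) : List String → Option (List String)
  | [] => none
  | l :: ls => if PySem.Str.isIn sig l then some (l :: pvCollect ls) else pvScan sig ls

theorem pvTakeBody_eq_pvCollect (ls : List String) : pvTakeBody ls = pvCollect ls := by
  induction ls with
  | nil => rfl
  | cons l ls ih => simp [pvTakeBody, pvCollect, ih]

theorem pvFindStart_shift (sig : String) (ls : List String) (n : Nat) :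
    pvFindStart sig ls (n + 1) = (pvFindStart sig ls n).map (· + 1) := by
  induction ls generalizing n with
  | nil => rfl
  | cons l ls ih =>
    simp only [pvFindStart]
    split_ifs with h
    · rfl
    · exact ih (n + 1)

-- A's two loops compute the fused scan
theorem pvScan_eq (sig : String) (lines : List String) :
    (match pvFindStart sig lines 0 with
     | none => none
     | some start => some (lines.getD start "" :: pvTakeBody (lines.drop (start + 1))))
      = pvScan sig lines := by
  induction lines with
  | nil => rfl
  | cons l ls ih =>
    simp only [pvFindStart, pvScan]
    split_ifs with h
    · simp [pvTakeBody_eq_pvCollect]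
    · rw [pvFindStart_shift]
      rw [← ih]
      cases pvFindStart sig ls 0 with
      | none => rfl
      | some j => simp

theorem pvSearchBlock_append (sig : String) (cur : List String) (l : String) :
    pvSearchBlock sig (cur ++ [l]) =
      match pvSearchBlock sig cur with
      | some r => some (r ++ [l])
      | none => if PySem.Str.isIn sig l then some [l] else none := by
  induction cur with
  | nil => simp [pvSearchBlock]
  | cons c cs ih =>
    simp only [List.cons_append, pvSearchBlock]
    by_cases h : PySem.Str.isIn sig c = true
    · rw [if_pos h, if_pos h]
      simp
    · rw [if_neg h, if_neg h, ih]

theorem pvSearchBlocks_append (sig : String) (bs cs : List (List String)) :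
    pvSearchBlocks sig (bs ++ cs) =
      match pvSearchBlocks sig bs with
      | some r => some r
      | none => pvSearchBlocks sig cs := by
  induction bs with
  | nil => rfl
  | cons b bs ih =>
    simp only [List.cons_append, pvSearchBlocks]
    cases pvSearchBlock sig b <;> simp [ih]

theorem pvGroup_shift (blocks : List (List String)) (cur : List String) (ls : List String) :
    pvGroup blocks cur ls = blocks ++ pvGroup [] cur ls := by
  induction ls generalizing blocks cur with
  | nil => rfl
  | cons l ls ih =>
    simp only [pvGroup]
    split_ifs with h
    · rw [ih (blocks ++ [cur]), ih ([] ++ [cur])]; simp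
    · rw [ih blocks, ih []]

-- B's group-then-search equals the fused scan, modulo the pending current block
theorem pvSearch_group (sig : String) (ls : List String) (cur : List String) :
    pvSearchBlocks sig (pvGroup [] cur ls) =
      match pvSearchBlock sig cur with
      | some r => some (r ++ pvCollect ls)
      | none => pvScan sig ls := by
  induction ls generalizing cur with
  | nil =>
    simp only [pvGroup, List.nil_append, pvSearchBlocks, pvScan]
    cases hc : pvSearchBlock sig cur <;> simp [pvCollect]
  | cons l ls ih =>
    simp only [pvGroup, List.nil_append]
    by_cases h : (PySem.Str.startswith l "def " || PySem.Str.startswith l "class ") = true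
    · rw [if_pos h, pvGroup_shift [cur], pvSearchBlocks_append]
      simp only [pvSearchBlocks]
      cases hc : pvSearchBlock sig cur with
      | some r => simp only [pvCollect, if_pos h]; simp
      | none =>
        rw [ih [l]]
        simp only [pvSearchBlock, pvScan]
        by_cases hin : PySem.Str.isIn sig l = true
        · rw [if_pos hin, if_pos hin]
          simp
        · rw [if_neg hin, if_neg hin]
    · rw [if_neg h, ih (cur ++ [l]), pvSearchBlock_append]
      cases hc : pvSearchBlock sig cur with
      | some r => simp only [pvCollect, if_neg h]; simp
      | none =>
        simp only [pvScan]
        by_cases hin : PySem.Str.isIn sig l = true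
        · rw [if_pos hin, if_pos hin]
          simp
        · rw [if_neg hin, if_neg hin]

-- ===== VERDICT (by name: the statement is the Claim_ definition above) =====
theorem function_body_py_spec : Claim_equal_function_body_py := by
  intro src sig _ _
  unfold Spec_function_body_py function_body_py function_body_py_alt
  rw [pvSearch_group]
  simp only [pvSearchBlock]
  rw [← pvScan_eq]
  cases h : pvFindStart sig (PySem.Str.splitlines src) 0 <;> simp
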